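-- pv_equiv track=rewrite | github.com/SuperMe-AI-Skills/ai-research-pipeline | skills/vera-ai-nlp-analyzing/src/dl_gru_extra.py | build_vocab_gru
-- ===== SOURCE A (Python) =====
-- from typing import Any, Dict, List, Optional, Sequence, Tuple, Union
-- from collections import Counter
--
-- PAD_TOKEN = "<PAD>"
--
-- UNK_TOKEN = "<UNK>"
--
-- def build_vocab_gru(texts: Sequence[str], vocab_size: int) -> Dict[str, int]:
--     counter = Counter()
--     for t in texts:
--         if isinstance(t, str):
--             counter.update(t.split())
--     most_common = [w for w, _ in counter.most_common(max(vocab_size - 2, 0))]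
--     word_to_idx = {PAD_TOKEN: 0, UNK_TOKEN: 1}
--     idx = 2
--     for w in most_common:
--         if w not in word_to_idx:
--             word_to_idx[w] = idx
--             idx += 1
--     return word_to_idx
-- ===== SOURCE B (Python) =====
-- PAD_TOKEN = "<PAD>"
-- UNK_TOKEN = "<UNK>"
--
-- def build_vocab_gru(texts, vocab_size):
--     counts = {}
--     for t in texts:
--         if isinstance(t, str):
--             for w in t.split():
--                 counts[w] = counts.get(w, 0) + 1
--     # pigeonhole ranking: group the words into buckets by their exact count and
--     # walk the counts from the maximum down to 1 -- no comparison sort or heap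
--     # over the words; buckets keep first-insertion order, which is exactly
--     # most_common's stable tie order.
--     buckets = {}
--     maxc = 0
--     for w, c in counts.items():
--         buckets.setdefault(c, []).append(w)
--         if maxc < c:
--             maxc = c
--     ranked = []
--     for c in range(maxc, 0, -1):
--         ranked.extend(buckets.get(c, []))
--     k = max(vocab_size - 2, 0)
--     sel = [w for w in ranked[:k] if w != PAD_TOKEN and w != UNK_TOKEN]
--     vocab = {PAD_TOKEN: 0, UNK_TOKEN: 1}
--     vocab.update((w, i + 2) for i, w in enumerate(sel))
--     return vocab
-- ===== Notes on version B (the rewrite author's own statement) =====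
-- stated objective: faster
-- what changed: B replaces Counter.most_common's comparison-based top-k (heap/sort over the words) with a pigeonhole (counting-sort style) ranking -- words are grouped into buckets keyed by their exact count and the buckets are concatenated walking the counts from the maximum down to 1 -- and builds the vocab by filter + enumerate instead of a mutable index with membership tests.
import Mathlib
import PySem

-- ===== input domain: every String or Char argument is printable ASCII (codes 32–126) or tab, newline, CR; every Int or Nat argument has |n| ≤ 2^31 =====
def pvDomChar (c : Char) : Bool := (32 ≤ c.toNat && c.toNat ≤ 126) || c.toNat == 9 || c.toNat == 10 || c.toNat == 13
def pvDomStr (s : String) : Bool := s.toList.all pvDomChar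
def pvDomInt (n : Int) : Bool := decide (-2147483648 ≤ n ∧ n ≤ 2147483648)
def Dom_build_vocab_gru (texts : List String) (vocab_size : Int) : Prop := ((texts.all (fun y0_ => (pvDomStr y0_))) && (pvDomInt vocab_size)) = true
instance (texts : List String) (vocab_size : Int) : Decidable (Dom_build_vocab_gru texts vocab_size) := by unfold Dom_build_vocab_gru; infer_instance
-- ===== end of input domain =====

-- ===== PORT A =====
-- B replaces most_common's top-k selection with pigeonhole bucketing by count (alternative algorithm).
-- Counter.most_common(n) is heapq.nlargest(n, items, key=count), which is exactly the
-- stable descending sort on the count followed by take n (ported so below).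
def build_vocab_gru (texts : List String) (vocab_size : Int) : List (String × Int) :=
  let counter : PySem.Dict String Int :=
    texts.foldl (fun c t => (PySem.Str.split₀ t).foldl (fun c w => c.modify w 0 (· + 1)) c)
      PySem.Dict.empty
  let most_common : List String :=
    ((PySem.List.sorted counter.items (fun p => p.2) true).take (max (vocab_size - 2) 0).toNat).map
      (fun p => p.1)
  let init : PySem.Dict String Int := (PySem.Dict.empty.insert "<PAD>" 0).insert "<UNK>" 1
  let res := most_common.foldl
      (fun (s : PySem.Dict String Int × Int) w =>
        if s.1.contains w then s else (s.1.insert w s.2, s.2 + 1))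
      (init, 2)
  res.1.items

-- ===== PORT B =====
def build_vocab_gru_alt (texts : List String) (vocab_size : Int) : List (String × Int) :=
  let counts : PySem.Dict String Int :=
    texts.foldl (fun c t => (PySem.Str.split₀ t).foldl (fun c w => c.insert w (c.getD w 0 + 1)) c)
      PySem.Dict.empty
  -- one loop over counts.items() filling the buckets and tracking the maximum count
  let bm : PySem.Dict Int (List String) × Int :=
    counts.items.foldl
      (fun (s : PySem.Dict Int (List String) × Int) p =>
        (s.1.modify p.2 [] (· ++ [p.1]), if s.2 < p.2 then p.2 else s.2))
      (PySem.Dict.empty, 0)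
  let ranked : List String :=
    (PySem.List.pyRange bm.2 0 (-1)).foldl (fun acc c => acc ++ bm.1.getD c []) []
  let k : Int := max (vocab_size - 2) 0
  let sel : List String :=
    (PySem.List.slice ranked none (some k)).filter (fun w => w != "<PAD>" && w != "<UNK>")
  (((PySem.Dict.empty.insert "<PAD>" 0).insert "<UNK>" 1).update
      ((PySem.List.enumerate sel 0).map (fun p => (p.2, p.1 + 2)))).items

-- ===== PRECONDITION & SPEC =====
def Spec_build_vocab_gru (texts : List String) (vocab_size : Int) (out : List (String × Int)) : Prop := out = build_vocab_gru_alt texts vocab_size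
instance (texts : List String) (vocab_size : Int) (out : List (String × Int)) : Decidable (Spec_build_vocab_gru texts vocab_size out) := by unfold Spec_build_vocab_gru; infer_instance

-- ===== CLAIM (what is proved, stated in full; the proofs are below) =====
def Claim_equal_build_vocab_gru : Prop := ∀ (texts : List String) (vocab_size : Int), Dom_build_vocab_gru texts vocab_size → Spec_build_vocab_gru texts vocab_size (build_vocab_gru texts vocab_size)

-- ===== LEMMAS AND PROOFS =====

-- insertBy skips a prefix it is never inserted before
theorem insertBy_append_left {a : Type} (before : a -> a -> Bool) (x : a) (A B : List a)
    (h : ∀ y ∈ A, before x y = false) :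
    PySem.List.insertBy before x (A ++ B) = A ++ PySem.List.insertBy before x B := by
  induction A with
  | nil => rfl
  | cons y ys ih =>
      have hy : before x y = false := h y (by simp)
      simp only [List.cons_append, PySem.List.insertBy, hy, Bool.false_eq_true, if_false]
      rw [ih (fun z hz => h z (by simp [hz]))]

-- insertBy goes to the front of a list it precedes everywhere
theorem insertBy_front {a : Type} (before : a -> a -> Bool) (x : a) (B : List a)
    (h : ∀ y ∈ B, before x y = true) :
    PySem.List.insertBy before x B = x :: B := by
  cases B with
  | nil => rfl
  | cons b bs => simp [PySem.List.insertBy, h b (by simp)]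

-- split a countdown range at any point
theorem pyRange_neg_one_append (a m b : Int) (h1 : b ≤ m) (h2 : m ≤ a) :
    PySem.List.pyRange a b (-1) = PySem.List.pyRange a m (-1) ++ PySem.List.pyRange m b (-1) := by
  rw [PySem.List.pyRange_neg_one_eq_reverse, PySem.List.pyRange_neg_one_eq_reverse,
    PySem.List.pyRange_neg_one_eq_reverse,
    PySem.List.pyRange_one_append (b + 1) (m + 1) (a + 1) (by omega) (by omega),
    List.reverse_append]

-- THE CORE: a stable descending sort on an integer key in [1, M] is exactly the
-- concatenation of the key-buckets walked from M down to 1 (counting sort)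
theorem sorted_rev_eq_flatMap_buckets {a : Type} (key : a -> Int) (M : Int) (l : List a)
    (hb : ∀ x ∈ l, 1 ≤ key x ∧ key x ≤ M) :
    PySem.List.sorted l key true
      = (PySem.List.pyRange M 0 (-1)).flatMap (fun c => l.filter (fun x => key x == c)) := by
  induction l using List.reverseRecOn with
  | nil => simp [PySem.List.sorted_rev_eq_foldl_insertBy]
  | append_singleton l x ih =>
      have hbl : ∀ y ∈ l, 1 ≤ key y ∧ key y ≤ M := fun y hy => hb y (by simp [hy])
      have hx : 1 ≤ key x ∧ key x ≤ M := hb x (by simp)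
      rw [PySem.List.sorted_rev_eq_foldl_insertBy, List.foldl_append, List.foldl_cons,
        List.foldl_nil, ← PySem.List.sorted_rev_eq_foldl_insertBy, ih hbl]
      rw [pyRange_neg_one_append M (key x) 0 (by omega) (by omega),
        PySem.List.pyRange_neg_one_cons (show (0:Int) < key x by omega)]
      rw [List.flatMap_append, List.flatMap_cons, List.flatMap_append, List.flatMap_cons]
      -- the new element's bucket on the right-hand side
      have hfk : (l ++ [x]).filter (fun y => key y == key x)
          = l.filter (fun y => key y == key x) ++ [x] := by
        rw [List.filter_append]; simp
      have hfne : ∀ c, c ≠ key x → (l ++ [x]).filter (fun y => key y == c)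
          = l.filter (fun y => key y == c) := by
        intro c hc; rw [List.filter_append]; simp [hc.symm]
      have hhi : (PySem.List.pyRange M (key x) (-1)).flatMap
            (fun c => (l ++ [x]).filter (fun y => key y == c))
          = (PySem.List.pyRange M (key x) (-1)).flatMap (fun c => l.filter (fun y => key y == c)) :=
        List.flatMap_congr (fun c hc => hfne c
          (by have := PySem.List.mem_pyRange_neg_one.mp hc; omega))
      have hlo : (PySem.List.pyRange (key x - 1) 0 (-1)).flatMap
            (fun c => (l ++ [x]).filter (fun y => key y == c))
          = (PySem.List.pyRange (key x - 1) 0 (-1)).flatMap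
              (fun c => l.filter (fun y => key y == c)) :=
        List.flatMap_congr (fun c hc => hfne c
          (by have := PySem.List.mem_pyRange_neg_one.mp hc; omega))
      rw [hhi, hlo, hfk]
      -- insert x: skip the strictly-greater buckets and its own bucket, then go in front
      rw [← List.append_assoc]
      rw [insertBy_append_left _ x
        ((PySem.List.pyRange M (key x) (-1)).flatMap (fun c => l.filter (fun y => key y == c))
          ++ l.filter (fun y => key y == key x))
        _ (by
          intro y hy
          rcases List.mem_append.mp hy with hy | hy
          · obtain ⟨c, hc, hyc⟩ := List.mem_flatMap.mp hy
            have hcb := PySem.List.mem_pyRange_neg_one.mp hc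
            have : key y = c := by simpa using (List.mem_filter.mp hyc).2
            simp only [decide_eq_false_iff_not]
            omega
          · have : key y = key x := by simpa using (List.mem_filter.mp hy).2
            simp only [decide_eq_false_iff_not]
            omega)]
      rw [insertBy_front _ x _ (by
        intro y hy
        obtain ⟨c, hc, hyc⟩ := List.mem_flatMap.mp hy
        have hcb := PySem.List.mem_pyRange_neg_one.mp hc
        have : key y = c := by simpa using (List.mem_filter.mp hyc).2
        simp only [decide_eq_true_eq]
        omega)]
      simp

-- the pairs (w, i), (w', i+1), … that B's enumerate comprehension produces, written recursively
def pvAddIdx (l : List String) (i : Int) : List (String × Int) :=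
  match l with
  | [] => []
  | w :: t => (w, i) :: pvAddIdx t (i + 1)

theorem enumerate_map_eq_addIdx (l : List String) (s c : Int) :
    (PySem.List.enumerate l s).map (fun p => (p.2, p.1 + c)) = pvAddIdx l (s + c) := by
  induction l generalizing s with
  | nil => simp [PySem.List.enumerate_nil, pvAddIdx]
  | cons w t ih =>
      rw [PySem.List.enumerate_cons]
      simp only [List.map_cons, pvAddIdx]
      rw [ih (s + 1)]
      have h : s + 1 + c = s + c + 1 := by ring
      rw [h]

-- A's index loop over a duplicate-free list equals seeding-dict update with filter + indexing
theorem loopA_eq_update (p : String -> Bool) (ws : List String) :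
    ∀ (d : PySem.Dict String Int) (i : Int), ws.Nodup →
    (∀ w ∈ ws, d.contains w = !(p w)) →
    (ws.foldl
      (fun (s : PySem.Dict String Int × Int) w =>
        if s.1.contains w then s else (s.1.insert w s.2, s.2 + 1)) (d, i)).1
      = d.update (pvAddIdx (ws.filter p) i) := by
  induction ws with
  | nil => intro d i _ _; rfl
  | cons w t ih =>
      intro d i hnd h
      have hw : d.contains w = !(p w) := h w (by simp)
      by_cases hp : p w = true
      · have hc : d.contains w = false := by simp [hw, hp]
        simp only [List.foldl_cons, hc, List.filter_cons, hp, Bool.false_eq_true, if_false,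
          if_true, pvAddIdx]
        rw [ih (d.insert w i) (i + 1) (List.Nodup.of_cons hnd)
          (fun x hx => by
            have hxw : x ≠ w := by
              intro he; subst he; exact (List.nodup_cons.mp hnd).1 hx
            rw [PySem.Dict.contains_insert]
            simp [hxw, h x (by simp [hx])])]
        rfl
      · have hc : d.contains w = true := by simp [hw, hp]
        simp only [List.foldl_cons, hc, List.filter_cons, hp, Bool.false_eq_true, if_false,
          if_true]
        exact ih d i (List.Nodup.of_cons hnd) (fun x hx => h x (by simp [hx]))

theorem build_vocab_gru_eq (texts : List String) (vocab_size : Int) :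
    build_vocab_gru texts vocab_size = build_vocab_gru_alt texts vocab_size := by
  simp only [build_vocab_gru, build_vocab_gru_alt]
  set toks := texts.flatMap PySem.Str.split₀ with htoks
  have hcA : texts.foldl
      (fun c t => (PySem.Str.split₀ t).foldl (fun c w => c.modify w 0 (· + 1)) c)
      PySem.Dict.empty = PySem.Dict.counter toks := by
    rw [PySem.Dict.counter_eq_foldl, htoks, List.foldl_flatMap]
  have hcB : texts.foldl
      (fun c t => (PySem.Str.split₀ t).foldl (fun c w => c.insert w (c.getD w 0 + 1)) c)
      PySem.Dict.empty = PySem.Dict.counter toks := by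
    rw [← PySem.Dict.foldl_insert_getD_add_one_eq_counter, htoks, List.foldl_flatMap]
  rw [hcA, hcB]
  set cnt := PySem.Dict.counter toks with hcnt
  -- split B's bucket-and-max loop into its two components
  rw [PySem.List.foldl_prod_mk
    (fun (d : PySem.Dict Int (List String)) (p : String × Int) => d.modify p.2 [] (· ++ [p.1]))
    (fun (m : Int) (p : String × Int) => if m < p.2 then p.2 else m) cnt.items PySem.Dict.empty 0]
  set M : Int := cnt.items.foldl (fun m p => if m < p.2 then p.2 else m) 0 with hM
  -- the max-tracking loop is foldl max over the counts
  have hMmax : M = (cnt.items.map (fun p => p.2)).foldl max 0 := by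
    rw [hM, List.foldl_map]
    congr 1
    funext m p
    rcases lt_or_ge m p.2 with h | h
    · simp [h, max_eq_right (le_of_lt h)]
    · simp [not_lt.mpr h, max_eq_left h]
  have hMbounds : ∀ p ∈ cnt.items, p.2 ≤ M := by
    intro p hp
    rw [hMmax]
    exact (PySem.List.le_foldl_max (cnt.items.map (fun p => p.2)) 0).2 p.2
      (List.mem_map_of_mem hp)
  have hMge : (0:Int) ≤ M := by
    rw [hMmax]; exact (PySem.List.le_foldl_max (cnt.items.map (fun p => p.2)) 0).1
  have hlow : ∀ p ∈ cnt.items, (1:Int) ≤ p.2 := by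
    intro p hp
    rw [PySem.Dict.items_counter] at hp
    obtain ⟨w, hw, rfl⟩ := List.mem_map.mp hp
    have : w ∈ toks := (PySem.Set.mem_ofList _ _).mp hw
    have := List.count_pos_iff.mpr this
    simp only []
    omega
  -- each bucket read in B is the corresponding filter of the items
  have hbucket : ∀ c : Int,
      (cnt.items.foldl (fun (d : PySem.Dict Int (List String)) p => d.modify p.2 [] (· ++ [p.1]))
        PySem.Dict.empty).getD c []
      = (cnt.items.filter (fun p => p.2 == c)).map (fun p => p.1) := by
    intro c
    have hswap : cnt.items.foldl
        (fun (d : PySem.Dict Int (List String)) p => d.modify p.2 [] (· ++ [p.1]))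
        PySem.Dict.empty
        = (cnt.items.map (fun p => (p.2, p.1))).foldl
            (fun (d : PySem.Dict Int (List String)) q => d.modify q.1 [] (· ++ [q.2]))
            PySem.Dict.empty := by
      rw [List.foldl_map]
    rw [hswap, PySem.Dict.getD_foldl_modify_append, List.filter_map, List.map_map]
    simp [Function.comp_def]
  -- B's ranked list is A's stable descending sort of the items, projected to words
  have hranked :
      (PySem.List.pyRange M 0 (-1)).foldl
        (fun acc c => acc ++ (cnt.items.foldl
          (fun (d : PySem.Dict Int (List String)) p => d.modify p.2 [] (· ++ [p.1]))
          PySem.Dict.empty).getD c []) []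
      = (PySem.List.sorted cnt.items (fun p => p.2) true).map (fun p => p.1) := by
    rw [PySem.List.foldl_append_eq_flatMap]
    rw [sorted_rev_eq_flatMap_buckets (fun p => p.2) M cnt.items
      (fun x hx => ⟨hlow x hx, hMbounds x hx⟩)]
    rw [List.map_flatMap]
    simp only [List.nil_append]
    exact (List.flatMap_congr (fun c _ => hbucket c)).trans
      (List.flatMap_congr (fun c _ => rfl))
  rw [hranked]
  -- both slices agree
  have hk : (0:Int) ≤ max (vocab_size - 2) 0 := le_max_right _ _
  rw [PySem.List.slice_to _ hk, ← List.map_take]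
  set ranked := (PySem.List.sorted cnt.items (fun p => p.2) true).take
      (max (vocab_size - 2) 0).toNat with hrk
  set mc := ranked.map (fun p => p.1) with hmc
  have hnd : cnt.keys.Nodup := PySem.Dict.nodup_keys_counter toks
  have hrnd : mc.Nodup := by
    have hperm := (PySem.List.sorted_perm cnt.items (fun p => p.2) true)
    have hkeys : ((PySem.List.sorted cnt.items (fun p => p.2) true).map (fun p => p.1)).Nodup := by
      have : (cnt.items.map (fun p => p.1)).Nodup := hnd
      exact ((hperm.map (fun p => p.1)).nodup_iff).mpr this
    rw [hmc, hrk, List.map_take]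
    exact hkeys.sublist (List.take_sublist _ _)
  rw [loopA_eq_update (fun w => w != "<PAD>" && w != "<UNK>") mc _ 2 hrnd
    (fun w _ => by
      simp only [PySem.Dict.contains_insert]
      by_cases h1 : w = "<PAD>" <;> by_cases h2 : w = "<UNK>" <;>
        simp [h1, h2, bne, Bool.or_comm, PySem.Dict.contains_empty])]
  rw [enumerate_map_eq_addIdx _ 0 2]
  norm_num

-- ===== VERDICT (by name: the statement is the Claim_ definition above) =====
theorem build_vocab_gru_spec : Claim_equal_build_vocab_gru := by
  intro texts vocab_size _
  exact build_vocab_gru_eq texts vocab_size
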